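-- pv_equiv track=rewrite | github.com/MaanviGupta13/Maven-Conversion-Automation | AI Agent/tools/platform_dependencies.py | enrich_platform_dependencies
-- ===== SOURCE A (Python) =====
-- def enrich_platform_dependencies(dependencies, project_type):
--     def has(artifact_id):
--         return any(d["artifactId"] == artifact_id for d in dependencies)
--
--     if project_type in ["JSP", "Enterprise"]:
--         if not has("javax.servlet-api"):
--             dependencies.append({
--                 "groupId": "javax.servlet",
--                 "artifactId": "javax.servlet-api",
--                 "version": "3.1.0",
--                 "scope": "provided",
--                 "source": "PLATFORM"
--             })
--
--     if project_type == "JSP":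
--         if not has("jsp-api"):
--             dependencies.append({
--                 "groupId": "javax.servlet.jsp",
--                 "artifactId": "jsp-api",
--                 "version": "2.2",
--                 "scope": "provided",
--                 "source": "PLATFORM"
--             })
--
--     if project_type == "Enterprise":
--         if not has("javaee-api"):
--             dependencies.append({
--                 "groupId": "javax",
--                 "artifactId": "javaee-api",
--                 "version": "7.0",
--                 "scope": "provided",
--                 "source": "PLATFORM"
--             })
--
--     #ant project
--     if project_type == "Ant":
--         if not has("junit"):
--             dependencies.append({
--                 "groupId": "junit",
--                 "artifactId": "junit",
--                 "version": "4.8.2",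
--                 "scope": "compile",
--                 "source": "PLATFORM"
--             })
--
--     if project_type == "Simple":
--         # Do nothing platform-wise (intentionally)
--         pass
--
--     if not has("junit"):
--         dependencies.append({
--             "groupId": "junit",
--             "artifactId": "junit",
--             "version": "4.8.2",
--             "scope": "compile",
--             "source": "PLATFORM"
--         })
--
--     return dependencies
-- ===== SOURCE B (Python) =====
-- _PLATFORM_TABLE = {
--     "JSP": [
--         {"groupId": "javax.servlet", "artifactId": "javax.servlet-api",
--          "version": "3.1.0", "scope": "provided", "source": "PLATFORM"},
--         {"groupId": "javax.servlet.jsp", "artifactId": "jsp-api",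
--          "version": "2.2", "scope": "provided", "source": "PLATFORM"},
--     ],
--     "Enterprise": [
--         {"groupId": "javax.servlet", "artifactId": "javax.servlet-api",
--          "version": "3.1.0", "scope": "provided", "source": "PLATFORM"},
--         {"groupId": "javax", "artifactId": "javaee-api",
--          "version": "7.0", "scope": "provided", "source": "PLATFORM"},
--     ],
-- }
--
-- _JUNIT = {"groupId": "junit", "artifactId": "junit",
--           "version": "4.8.2", "scope": "compile", "source": "PLATFORM"}
--
--
-- def enrich_platform_dependencies(dependencies, project_type):
--     for spec in _PLATFORM_TABLE.get(project_type, []) + [_JUNIT]: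
--         if not any(d["artifactId"] == spec["artifactId"] for d in dependencies):
--             dependencies.append(dict(spec))
--     return dependencies
-- ===== Notes on version B (the rewrite author's own statement) =====
-- stated objective: simpler
-- what changed: Replaces the five inline if-branches with a data-driven table (project_type -> ordered list of platform specs) plus the always-checked junit spec, applied by one guarded-append loop; the redundant Ant branch is folded into the trailing junit check.
import Mathlib
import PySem

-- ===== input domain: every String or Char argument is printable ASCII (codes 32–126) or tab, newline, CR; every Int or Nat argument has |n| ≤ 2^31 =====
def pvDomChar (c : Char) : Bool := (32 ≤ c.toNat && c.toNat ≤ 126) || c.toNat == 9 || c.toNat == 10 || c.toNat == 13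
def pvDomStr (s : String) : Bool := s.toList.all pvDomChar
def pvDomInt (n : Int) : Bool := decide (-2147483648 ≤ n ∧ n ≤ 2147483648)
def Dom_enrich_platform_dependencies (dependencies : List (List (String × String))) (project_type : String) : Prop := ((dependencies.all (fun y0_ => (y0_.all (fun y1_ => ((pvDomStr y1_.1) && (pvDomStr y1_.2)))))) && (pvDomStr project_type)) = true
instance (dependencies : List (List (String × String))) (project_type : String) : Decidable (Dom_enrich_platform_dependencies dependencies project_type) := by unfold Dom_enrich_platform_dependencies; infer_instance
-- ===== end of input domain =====

-- B replaces A's five inline if-branches by a table of platform specs per project type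
-- plus one guarded-append loop (objective: simpler). A mutates `dependencies` in place;
-- the equivalence proved here is about the RETURN value (B performs the same appends).

-- ===== PORT A =====
-- Python `d["artifactId"]`: Pre_ guarantees the key is present, so `getD ""` is exact there.
def pvHasA (dependencies : List (List (String × String))) (artifact_id : String) : Bool :=
  dependencies.any (fun d => ((d.lookup "artifactId").getD "") == artifact_id)

def pvServletSpec : List (String × String) :=
  [("groupId", "javax.servlet"), ("artifactId", "javax.servlet-api"),
   ("version", "3.1.0"), ("scope", "provided"), ("source", "PLATFORM")]
def pvJspSpec : List (String × String) :=
  [("groupId", "javax.servlet.jsp"), ("artifactId", "jsp-api"),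
   ("version", "2.2"), ("scope", "provided"), ("source", "PLATFORM")]
def pvJavaeeSpec : List (String × String) :=
  [("groupId", "javax"), ("artifactId", "javaee-api"),
   ("version", "7.0"), ("scope", "provided"), ("source", "PLATFORM")]
def pvJunitSpec : List (String × String) :=
  [("groupId", "junit"), ("artifactId", "junit"),
   ("version", "4.8.2"), ("scope", "compile"), ("source", "PLATFORM")]

def enrich_platform_dependencies (dependencies : List (List (String × String))) (project_type : String) : List (List (String × String)) :=
  let d1 := if (project_type == "JSP" || project_type == "Enterprise")
               && !pvHasA dependencies "javax.servlet-api"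
            then dependencies ++ [pvServletSpec] else dependencies
  let d2 := if project_type == "JSP" && !pvHasA d1 "jsp-api"
            then d1 ++ [pvJspSpec] else d1
  let d3 := if project_type == "Enterprise" && !pvHasA d2 "javaee-api"
            then d2 ++ [pvJavaeeSpec] else d2
  let d4 := if project_type == "Ant" && !pvHasA d3 "junit"
            then d3 ++ [pvJunitSpec] else d3
  -- (the `if project_type == "Simple": pass` branch does nothing)
  if !pvHasA d4 "junit" then d4 ++ [pvJunitSpec] else d4

-- ===== PORT B =====
-- _PLATFORM_TABLE as an association list; _PLATFORM_TABLE.get(pt, []) = (lookup pt).getD []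
def pvPlatformTable : List (String × List (List (String × String))) :=
  [("JSP", [pvServletSpec, pvJspSpec]),
   ("Enterprise", [pvServletSpec, pvJavaeeSpec])]

def enrich_platform_dependencies_alt (dependencies : List (List (String × String))) (project_type : String) : List (List (String × String)) :=
  ((pvPlatformTable.lookup project_type).getD [] ++ [pvJunitSpec]).foldl
    (fun deps spec =>
      if !deps.any (fun d => ((d.lookup "artifactId").getD "") == ((spec.lookup "artifactId").getD ""))
      then deps ++ [spec] else deps)
    dependencies

-- ===== PRECONDITION & SPEC =====
-- Pre_ excludes lists containing a dict without an "artifactId" key: Python's d["artifactId"]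
-- raises KeyError when the scan reaches such a dict (on a few such inputs any() short-circuits
-- first and A still returns; both programs return the same value there, see the cited example).
def Pre_enrich_platform_dependencies (dependencies : List (List (String × String))) (project_type : String) : Prop :=
  ∀ d ∈ dependencies, (d.lookup "artifactId").isSome

instance (dependencies : List (List (String × String))) (project_type : String) : Decidable (Pre_enrich_platform_dependencies dependencies project_type) := by unfold Pre_enrich_platform_dependencies; infer_instance

def pvWitness_enrich_platform_dependencies : (List (List (String × String))) × String :=
  ([[("artifactId", "junit"), ("version", "4.12")]], "JSP")

def Spec_enrich_platform_dependencies (dependencies : List (List (String × String))) (project_type : String) (out : List (List (String × String))) : Prop := out = enrich_platform_dependencies_alt dependencies project_type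
instance (dependencies : List (List (String × String))) (project_type : String) (out : List (List (String × String))) : Decidable (Spec_enrich_platform_dependencies dependencies project_type out) := by unfold Spec_enrich_platform_dependencies; infer_instance

-- ===== CLAIM (what is proved, stated in full; the proofs are below) =====
def Claim_equal_enrich_platform_dependencies : Prop := ∀ (dependencies : List (List (String × String))) (project_type : String), Dom_enrich_platform_dependencies dependencies project_type → Pre_enrich_platform_dependencies dependencies project_type → Spec_enrich_platform_dependencies dependencies project_type (enrich_platform_dependencies dependencies project_type)

-- ===== LEMMAS AND PROOFS =====

-- ===== VERDICT (by name: the statement is the Claim_ definition above) =====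
theorem enrich_platform_dependencies_spec : Claim_equal_enrich_platform_dependencies := by
  intro deps pt _ _
  show _ = _
  by_cases hj : pt = "JSP"
  · subst hj
    simp [enrich_platform_dependencies, enrich_platform_dependencies_alt, pvPlatformTable,
      pvHasA, List.foldl, List.lookup, pvServletSpec, pvJspSpec, pvJunitSpec]
  · by_cases he : pt = "Enterprise"
    · subst he
      simp [enrich_platform_dependencies, enrich_platform_dependencies_alt, pvPlatformTable,
        pvHasA, List.foldl, List.lookup, pvServletSpec, pvJavaeeSpec, pvJunitSpec]
    · by_cases ha : pt = "Ant"
      · subst ha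
        simp only [enrich_platform_dependencies, enrich_platform_dependencies_alt, pvPlatformTable]
        by_cases hc : pvHasA deps "junit"
        · simp only [pvHasA, List.any_eq_true, beq_iff_eq] at hc
          simp [pvHasA, List.foldl, List.lookup, pvJunitSpec]
          have hcond : ¬ (∀ x ∈ deps, ¬(List.lookup "artifactId" x).getD "" = "junit") := by
            obtain ⟨x, hx, hv⟩ := hc
            exact fun h => h x hx hv
          rw [if_neg hcond]
          exact hc
        · simp only [pvHasA, List.any_eq_true, beq_iff_eq] at hc
          simp only [not_exists, not_and] at hc
          simp [pvHasA, List.foldl, List.lookup, pvJunitSpec]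
          rw [if_pos hc]
          exact ⟨_, List.mem_append.mpr (Or.inr (List.mem_singleton.mpr rfl)), by decide⟩
      · have h1 : (pt == "JSP") = false := by simp [hj]
        have h2 : (pt == "Enterprise") = false := by simp [he]
        have h3 : (pt == "Ant") = false := by simp [ha]
        simp [enrich_platform_dependencies, enrich_platform_dependencies_alt, pvPlatformTable,
          pvHasA, List.foldl, List.lookup, pvJunitSpec, h1, h2, h3]
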